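-- pv_equiv track=rewrite | github.com/helenyao111/wordle | wordle.py | no_letters
-- ===== SOURCE A (Python) =====
-- def no_letters(clues):
--     '''
--     Purpose:
--         This function gives a string of letters that are not in the word.
--     Parameter:
--         clues: a list of tuples, with each tuple being a guess (string) and the clues returned (a list of strings,
--         consisting of "green", "yellow", "grey").
--     Return:
--         A string of alphabetically ordered capital letters that are not in the word.
--     '''
--     yellows_or_greens = [] # A list stores yellow letters (with duplicates)
--     greys = [] # A list stores yellow letters (with duplicates)
--     output = "" # The ouput string
--     for element in clues:
--         colors = element[1]
--         for color_index in range(len(colors)):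
--             if (colors[color_index] == 'yellow' or colors[color_index] == 'green'):
--                 yellows_or_greens.append(element[0][color_index])
--     yellows_or_greens = list(set(yellows_or_greens)) # Remove duplicates
--
--     for ele in clues:
--         for index in range(len(ele[1])):
--             if((ele[1][index] == 'grey') and (ele[0][index] not in yellows_or_greens)):
--                 greys.append(ele[0][index])
--     greys = list(set(greys)) # Remove duplicates
--     greys.sort() # Sort into alphabetic order
--
--     for i in range(len(greys)):
--         output += greys[i]
--
--     return output
-- ===== SOURCE B (Python) =====
-- def no_letters(clues):
--     '''
--     A string of alphabetically ordered letters that every clue marks grey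
--     and no clue marks yellow or green.
--     '''
--     present = set()
--     greys = set()
--     for word, colors in clues:
--         for i, color in enumerate(colors):
--             if color in ('yellow', 'green'):
--                 present.add(word[i])
--             elif color == 'grey':
--                 greys.add(word[i])
--     return ''.join(sorted(greys - present))
-- ===== Notes on version B (the rewrite author's own statement) =====
-- stated objective: simpler
-- what changed: One combined pass classifies each clue letter into a 'present' set or a 'greys' set, and the answer is the sorted set difference greys - present, replacing A's two separate full scans, inline list-membership filtering and character-by-character string concatenation loop.
import Mathlib
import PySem

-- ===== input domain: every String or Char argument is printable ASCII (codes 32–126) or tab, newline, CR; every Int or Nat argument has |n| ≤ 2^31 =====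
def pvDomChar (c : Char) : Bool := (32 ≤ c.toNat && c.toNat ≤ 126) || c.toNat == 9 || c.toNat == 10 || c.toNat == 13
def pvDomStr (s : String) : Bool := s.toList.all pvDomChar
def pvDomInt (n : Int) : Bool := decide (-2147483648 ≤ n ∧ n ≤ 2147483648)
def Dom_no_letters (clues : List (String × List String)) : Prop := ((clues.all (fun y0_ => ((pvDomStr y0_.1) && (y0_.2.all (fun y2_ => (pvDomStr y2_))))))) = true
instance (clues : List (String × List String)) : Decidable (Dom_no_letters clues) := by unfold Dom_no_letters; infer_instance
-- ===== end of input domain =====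

-- B replaces A's two separate scans plus inline membership filtering by one combined
-- classifying pass over the clues and a set difference (objective: simpler).

-- ===== PORT A =====
def no_letters (clues : List (String × List String)) : String :=
  -- yellows_or_greens: first full pass over clues, for color_index in range(len(colors))
  let yellows_or_greens : List Char := clues.foldl (fun acc element =>
    (PySem.List.pyRange 0 (element.2.length : Int) 1).foldl (fun acc2 color_index =>
      if PySem.List.pyGetD element.2 color_index "" = "yellow" ∨
         PySem.List.pyGetD element.2 color_index "" = "green" then
        -- element[0][color_index]: word indexing; Python IndexError is excluded by Pre_
        acc2 ++ [PySem.List.pyGetD element.1.toList color_index ' ']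
      else acc2) acc) []
  -- yellows_or_greens = list(set(yellows_or_greens)) (used only for membership below)
  let ygset : PySem.Set Char := PySem.Set.ofList yellows_or_greens
  -- second full pass collecting grey letters not in yellows_or_greens
  let greys : List Char := clues.foldl (fun acc ele =>
    (PySem.List.pyRange 0 (ele.2.length : Int) 1).foldl (fun acc2 index =>
      if PySem.List.pyGetD ele.2 index "" = "grey" ∧
         ¬ (PySem.List.pyGetD ele.1.toList index ' ') ∈ ygset then
        acc2 ++ [PySem.List.pyGetD ele.1.toList index ' ']
      else acc2) acc) []
  -- greys = list(set(greys)); greys.sort()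
  let greys2 : List Char := PySem.List.sorted (PySem.Set.ofList greys) (fun x => x) false
  -- for i in range(len(greys)): output += greys[i]
  String.ofList ((PySem.List.pyRange 0 (greys2.length : Int) 1).foldl
    (fun out i => out ++ [PySem.List.pyGetD greys2 i ' ']) [])

-- ===== PORT B =====
def no_letters_alt (clues : List (String × List String)) : String :=
  -- one pass: classify each letter into (present, greys)
  let pg : PySem.Set Char × PySem.Set Char :=
    clues.foldl (fun pg wc =>
      (PySem.List.enumerate wc.2 0).foldl (fun pg ic =>
        if ic.2 = "yellow" ∨ ic.2 = "green" then
          (PySem.Set.add pg.1 (PySem.List.pyGetD wc.1.toList ic.1 ' '), pg.2)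
        else if ic.2 = "grey" then
          (pg.1, PySem.Set.add pg.2 (PySem.List.pyGetD wc.1.toList ic.1 ' '))
        else pg) pg) (PySem.Set.empty, PySem.Set.empty)
  -- ''.join(sorted(greys - present))
  String.ofList (PySem.List.sorted (PySem.Set.diff pg.2 pg.1) (fun x => x) false)

-- ===== PRECONDITION & SPEC =====
-- Pre_ excludes exactly the inputs on which Python A raises IndexError: a clue whose
-- colors list marks (yellow/green/grey) a position at or beyond the word's length.
def Pre_no_letters (clues : List (String × List String)) : Prop :=
  ∀ p ∈ clues, ∀ i ∈ List.range p.2.length,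
    (p.2.getD i "" = "yellow" ∨ p.2.getD i "" = "green" ∨ p.2.getD i "" = "grey") →
      i < p.1.toList.length
instance (clues : List (String × List String)) : Decidable (Pre_no_letters clues) := by
  unfold Pre_no_letters; infer_instance

def pvWitness_no_letters : (List (String × List String)) :=
  [("AB", ["grey", "yellow"]), ("CD", ["grey", "grey"])]

def Spec_no_letters (clues : List (String × List String)) (out : String) : Prop := out = no_letters_alt clues
instance (clues : List (String × List String)) (out : String) : Decidable (Spec_no_letters clues out) := by unfold Spec_no_letters; infer_instance

-- ===== CLAIM (what is proved, stated in full; the proofs are below) =====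
def Claim_equal_no_letters : Prop := ∀ (clues : List (String × List String)), Dom_no_letters clues → Pre_no_letters clues → Spec_no_letters clues (no_letters clues)

-- ===== LEMMAS AND PROOFS =====

-- the letters at yellow/green positions of one clue, indices starting at s
def ychars (w : List Char) (cs : List String) (s : Int) : List Char :=
  match cs with
  | [] => []
  | c :: t => (if c = "yellow" ∨ c = "green" then [PySem.List.pyGetD w s ' '] else []) ++ ychars w t (s + 1)

-- the letters at grey positions of one clue
def gchars (w : List Char) (cs : List String) (s : Int) : List Char :=
  match cs with
  | [] => []
  | c :: t => (if c = "grey" then [PySem.List.pyGetD w s ' '] else []) ++ gchars w t (s + 1)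

-- the letters at grey positions not in the set S (A's second-pass condition)
def gcharsN (w : List Char) (cs : List String) (s : Int) (S : PySem.Set Char) : List Char :=
  match cs with
  | [] => []
  | c :: t => (if c = "grey" ∧ ¬ (PySem.List.pyGetD w s ' ') ∈ S then [PySem.List.pyGetD w s ' '] else []) ++ gcharsN w t (s + 1) S

def ygAll (clues : List (String × List String)) : List Char :=
  clues.flatMap (fun pr => ychars pr.1.toList pr.2 0)

def gAll (clues : List (String × List String)) : List Char :=
  clues.flatMap (fun pr => gchars pr.1.toList pr.2 0)

theorem mem_gcharsN (w : List Char) (cs : List String) (s : Int) (S : PySem.Set Char) (x : Char) :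
    x ∈ gcharsN w cs s S ↔ x ∈ gchars w cs s ∧ ¬ x ∈ S := by
  induction cs generalizing s with
  | nil => simp [gcharsN, gchars]
  | cons c t ih =>
    simp only [gcharsN, gchars]
    split_ifs with h1 h2 h2 <;>
      by_cases hx : x = PySem.List.pyGetD w s ' ' <;> simp_all

-- A's first inner loop, in enumerate form
theorem enumFoldA_yg (w : List Char) (cs : List String) (s : Int) (acc : List Char) :
    (PySem.List.enumerate cs s).foldl (fun acc2 ic =>
      if ic.2 = "yellow" ∨ ic.2 = "green" then acc2 ++ [PySem.List.pyGetD w ic.1 ' '] else acc2) acc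
    = acc ++ ychars w cs s := by
  induction cs generalizing s acc with
  | nil => simp [PySem.List.enumerate_nil, ychars]
  | cons c t ih =>
    rw [PySem.List.enumerate_cons]
    simp only [List.foldl_cons, ychars]
    split_ifs with h <;> simp [ih]

-- A's second inner loop, in enumerate form
theorem enumFoldA_grey (w : List Char) (cs : List String) (s : Int) (acc : List Char) (S : PySem.Set Char) :
    (PySem.List.enumerate cs s).foldl (fun acc2 ic =>
      if ic.2 = "grey" ∧ ¬ (PySem.List.pyGetD w ic.1 ' ') ∈ S then acc2 ++ [PySem.List.pyGetD w ic.1 ' '] else acc2) acc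
    = acc ++ gcharsN w cs s S := by
  induction cs generalizing s acc with
  | nil => simp [PySem.List.enumerate_nil, gcharsN]
  | cons c t ih =>
    rw [PySem.List.enumerate_cons]
    simp only [List.foldl_cons, gcharsN]
    split_ifs with h <;> simp [ih]

-- A's first inner loop (range form)
theorem innerA_yg (w : List Char) (cs : List String) (acc : List Char) :
    (PySem.List.pyRange 0 (cs.length : Int) 1).foldl (fun acc2 color_index =>
      if PySem.List.pyGetD cs color_index "" = "yellow" ∨
         PySem.List.pyGetD cs color_index "" = "green" then
        acc2 ++ [PySem.List.pyGetD w color_index ' ']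
      else acc2) acc
    = acc ++ ychars w cs 0 := by
  have h := enumFoldA_yg w cs 0 acc
  rw [PySem.List.enumerate_eq_map_pyRange (d := ""), List.foldl_map] at h
  exact h

-- A's second inner loop (range form)
theorem innerA_grey (w : List Char) (cs : List String) (acc : List Char) (S : PySem.Set Char) :
    (PySem.List.pyRange 0 (cs.length : Int) 1).foldl (fun acc2 index =>
      if PySem.List.pyGetD cs index "" = "grey" ∧
         ¬ (PySem.List.pyGetD w index ' ') ∈ S then
        acc2 ++ [PySem.List.pyGetD w index ' ']
      else acc2) acc
    = acc ++ gcharsN w cs 0 S := by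
  have h := enumFoldA_grey w cs 0 acc S
  rw [PySem.List.enumerate_eq_map_pyRange (d := ""), List.foldl_map] at h
  exact h

-- A's outer loops
theorem outerA_yg (clues : List (String × List String)) (acc : List Char) :
    clues.foldl (fun acc element =>
      (PySem.List.pyRange 0 (element.2.length : Int) 1).foldl (fun acc2 color_index =>
        if PySem.List.pyGetD element.2 color_index "" = "yellow" ∨
           PySem.List.pyGetD element.2 color_index "" = "green" then
          acc2 ++ [PySem.List.pyGetD element.1.toList color_index ' ']
        else acc2) acc) acc
    = acc ++ ygAll clues := by
  induction clues generalizing acc with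
  | nil => simp [ygAll]
  | cons hd tl ih =>
    simp only [List.foldl_cons]
    rw [innerA_yg, ih]
    simp [ygAll]

theorem outerA_grey (clues : List (String × List String)) (acc : List Char) (S : PySem.Set Char) :
    clues.foldl (fun acc ele =>
      (PySem.List.pyRange 0 (ele.2.length : Int) 1).foldl (fun acc2 index =>
        if PySem.List.pyGetD ele.2 index "" = "grey" ∧
           ¬ (PySem.List.pyGetD ele.1.toList index ' ') ∈ S then
          acc2 ++ [PySem.List.pyGetD ele.1.toList index ' ']
        else acc2) acc) acc
    = acc ++ clues.flatMap (fun pr => gcharsN pr.1.toList pr.2 0 S) := by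
  induction clues generalizing acc with
  | nil => simp
  | cons hd tl ih =>
    simp only [List.foldl_cons]
    rw [innerA_grey, ih]
    simp

-- B's inner loop: componentwise set updates
theorem innerB (w : List Char) (cs : List String) (s : Int) (p g : PySem.Set Char) :
    (PySem.List.enumerate cs s).foldl (fun pg ic =>
      if ic.2 = "yellow" ∨ ic.2 = "green" then
        (PySem.Set.add pg.1 (PySem.List.pyGetD w ic.1 ' '), pg.2)
      else if ic.2 = "grey" then
        (pg.1, PySem.Set.add pg.2 (PySem.List.pyGetD w ic.1 ' '))
      else pg) (p, g)
    = (PySem.Set.update p (ychars w cs s), PySem.Set.update g (gchars w cs s)) := by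
  induction cs generalizing s p g with
  | nil => simp [PySem.List.enumerate_nil, ychars, gchars, PySem.Set.update_nil]
  | cons c t ih =>
    rw [PySem.List.enumerate_cons]
    simp only [List.foldl_cons, ychars, gchars]
    by_cases h1 : c = "yellow" ∨ c = "green"
    · have h2 : ¬ c = "grey" := by rcases h1 with h | h <;> simp [h]
      simp [h1, h2, ih, PySem.Set.update_cons]
    · by_cases h2 : c = "grey"
      · simp [h2, ih, PySem.Set.update_cons]
      · simp [h1, h2, ih]

-- B's outer loop
theorem outerB (clues : List (String × List String)) (p g : PySem.Set Char) :
    clues.foldl (fun pg wc =>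
      (PySem.List.enumerate wc.2 0).foldl (fun pg ic =>
        if ic.2 = "yellow" ∨ ic.2 = "green" then
          (PySem.Set.add pg.1 (PySem.List.pyGetD wc.1.toList ic.1 ' '), pg.2)
        else if ic.2 = "grey" then
          (pg.1, PySem.Set.add pg.2 (PySem.List.pyGetD wc.1.toList ic.1 ' '))
        else pg) pg) (p, g)
    = (PySem.Set.update p (ygAll clues), PySem.Set.update g (gAll clues)) := by
  induction clues generalizing p g with
  | nil => simp [ygAll, gAll, PySem.Set.update_nil]
  | cons hd tl ih =>
    simp only [List.foldl_cons]
    rw [innerB, ih]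
    simp [ygAll, gAll, PySem.Set.update_append]

-- the final A loop 'for i in range(len(l)): output += l[i]' rebuilds l
theorem outLoop (l : List Char) :
    (PySem.List.pyRange 0 (l.length : Int) 1).foldl (fun out i => out ++ [PySem.List.pyGetD l i ' ']) []
    = l := by
  have h2 := PySem.List.map_pyGetD_pyRange_zero (xs := l) (d := ' ')
  simp only [PySem.List.len] at h2
  have h1 : ((PySem.List.pyRange 0 (l.length : Int) 1).map (fun j => PySem.List.pyGetD l j ' ')).foldl
      (fun out c => out ++ [c]) ([] : List Char)
      = (PySem.List.pyRange 0 (l.length : Int) 1).foldl (fun out i => out ++ [PySem.List.pyGetD l i ' ']) [] := by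
    rw [List.foldl_map]
  rw [← h1, h2, PySem.List.foldl_append_singleton, List.nil_append]

theorem ports_eq (clues : List (String × List String)) : no_letters clues = no_letters_alt clues := by
  simp only [no_letters, no_letters_alt]
  rw [outerA_yg, List.nil_append, outerA_grey, outerB, outLoop]
  simp only [List.nil_append, PySem.Set.empty, PySem.Set.update_nil_left]
  congr 1
  apply PySem.List.sorted_eq_sorted_of_perm _ _ _ (fun a b h => h)
  rw [List.perm_ext_iff_of_nodup (PySem.Set.nodup_ofList _)
    (PySem.Set.nodup_diff _ _ (PySem.Set.nodup_ofList _))]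
  intro a
  rw [PySem.Set.mem_ofList, PySem.Set.mem_diff, PySem.Set.mem_ofList, List.mem_flatMap]
  constructor
  · rintro ⟨pr, hpr, hmem⟩
    rw [mem_gcharsN] at hmem
    rcases hmem with ⟨hg, hns⟩
    refine ⟨?_, hns⟩
    exact List.mem_flatMap.mpr ⟨pr, hpr, hg⟩
  · rintro ⟨hg, hns⟩
    rcases List.mem_flatMap.mp hg with ⟨pr, hpr, hmem⟩
    exact ⟨pr, hpr, (mem_gcharsN _ _ _ _ _).mpr ⟨hmem, hns⟩⟩

-- ===== VERDICT (by name: the statement is the Claim_ definition above) =====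
theorem no_letters_spec : Claim_equal_no_letters := by
  intro clues _ _
  exact ports_eq clues
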